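-- pv_equiv track=rewrite | github.com/fhgr/harvest | src/harvest/cleanup/forum_post.py | compute_common_prefix_count
-- ===== SOURCE A (Python) =====
-- def compute_common_prefix_count(post_list):
--     '''
--     Returns:
--     	int: The number of common prefix terms.
--     '''
--     confirmed_prefix_terms = []
--     for prefix_term in post_list[0].split(' '):
--         new_prefix = ' '.join(confirmed_prefix_terms + [prefix_term]) + ' '
--         for post in post_list:
--             if not post.startswith(new_prefix):
--                 return len(confirmed_prefix_terms)
--         confirmed_prefix_terms.append(prefix_term)
--
--     return len(confirmed_prefix_terms)
-- ===== SOURCE B (Python) =====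
-- def compute_common_prefix_count(post_list):
--     '''
--     Returns:
--     	int: The number of common prefix terms.
--     '''
--     # single pass: length of the longest common character prefix of all posts,
--     # then the answer is the number of spaces inside that common prefix.
--     first = post_list[0]
--     lcp = len(first)
--     for post in post_list:
--         i = 0
--         while i < lcp and i < len(post) and post[i] == first[i]:
--             i += 1
--         lcp = i
--     return first[:lcp].count(' ')
-- ===== Notes on version B (the rewrite author's own statement) =====
-- stated objective: alternative
-- what changed: Instead of re-joining the confirmed words and re-testing every post with startswith for each word of the first post, B computes the longest common character prefix of all posts in one bounded scan per post and returns the number of spaces inside it.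
import Mathlib
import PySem

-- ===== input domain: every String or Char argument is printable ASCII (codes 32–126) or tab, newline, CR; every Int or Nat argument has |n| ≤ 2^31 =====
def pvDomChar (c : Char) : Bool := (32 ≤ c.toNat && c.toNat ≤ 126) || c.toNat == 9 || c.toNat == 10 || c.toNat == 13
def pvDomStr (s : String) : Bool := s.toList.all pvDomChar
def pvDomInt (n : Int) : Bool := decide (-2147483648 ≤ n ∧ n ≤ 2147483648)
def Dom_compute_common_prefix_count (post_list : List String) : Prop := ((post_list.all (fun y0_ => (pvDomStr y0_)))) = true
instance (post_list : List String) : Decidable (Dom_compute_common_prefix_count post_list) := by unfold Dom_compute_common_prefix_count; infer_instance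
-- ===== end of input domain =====

-- B replaces A's per-word re-join + startswith check of every post by one bounded character
-- scan per post (longest common prefix), returning the number of spaces inside it
-- (objective: alternative).

-- ===== PORT A =====
-- inner loop 'for post in post_list: if not post.startswith(new_prefix): return …' as a Bool scan
def pvAllStart (posts : List (List Char)) (p : List Char) : Bool :=
  match posts with
  | [] => true
  | q :: qs => if PySem.Chars.startswith q p = false then false else pvAllStart qs p

-- outer loop 'for prefix_term in post_list[0].split(" ")' with the confirmed-terms accumulator
def pvGoA (posts : List (List Char)) : List (List Char) → List (List Char) → Int
  | [], confirmed => (confirmed.length : Int)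
  | w :: ws, confirmed =>
    let new_prefix := PySem.Chars.join [' '] (confirmed ++ [w]) ++ [' ']
    if pvAllStart posts new_prefix = false then (confirmed.length : Int)
    else pvGoA posts ws (confirmed ++ [w])

def compute_common_prefix_count (post_list : List String) : Int :=
  match post_list with
  | [] => 0   -- Python raises IndexError here (post_list[0]); excluded by Pre_
  | first :: _ =>
    pvGoA (post_list.map String.toList) (PySem.Chars.splitOn first.toList [' ']) []

-- ===== PORT B =====
-- 'while i < lcp and i < len(post) and post[i] == first[i]: i += 1' as a bounded two-list scan
def pvScan : Nat → List Char → List Char → Nat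
  | 0, _, _ => 0
  | _ + 1, [], _ => 0
  | _ + 1, _ :: _, [] => 0
  | l + 1, a :: as, b :: bs => if b == a then pvScan l as bs + 1 else 0

def compute_common_prefix_count_alt (post_list : List String) : Int :=
  match post_list with
  | [] => 0   -- Python raises IndexError here (post_list[0]); excluded by Pre_
  | first :: _ =>
    let fc := first.toList
    let lcp := post_list.foldl (fun l p => pvScan l fc p.toList) fc.length
    (PySem.Chars.count (fc.take lcp) [' '] : Int)

-- ===== PRECONDITION & SPEC =====
-- Pre_ excludes only the empty list, on which the Python A raises IndexError (post_list[0]).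
def Pre_compute_common_prefix_count (post_list : List String) : Prop := post_list ≠ []
instance (post_list : List String) : Decidable (Pre_compute_common_prefix_count post_list) := by
  unfold Pre_compute_common_prefix_count; infer_instance
def pvWitness_compute_common_prefix_count : List String := ["a b c", "a b d"]

def Spec_compute_common_prefix_count (post_list : List String) (out : Int) : Prop := out = compute_common_prefix_count_alt post_list
instance (post_list : List String) (out : Int) : Decidable (Spec_compute_common_prefix_count post_list out) := by unfold Spec_compute_common_prefix_count; infer_instance

-- ===== CLAIM (what is proved, stated in full; the proofs are below) =====
def Claim_equal_compute_common_prefix_count : Prop := ∀ (post_list : List String), Dom_compute_common_prefix_count post_list → Pre_compute_common_prefix_count post_list → Spec_compute_common_prefix_count post_list (compute_common_prefix_count post_list)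

-- ===== LEMMAS AND PROOFS =====

-- PySem.Chars.count with a single-character needle is List.count
theorem pvCountGo_single (fuel : Nat) : ∀ (l : List Char) (acc : Nat), l.length ≤ fuel →
    PySem.Chars.count.go [' '] fuel l acc = acc + l.count ' ' := by
  induction fuel with
  | zero =>
    intro l acc h
    cases l with
    | nil => simp [PySem.Chars.count.go]
    | cons c t => simp at h
  | succ n ih =>
    intro l acc h
    cases l with
    | nil => simp [PySem.Chars.count.go]
    | cons c t =>
      have ht : t.length ≤ n := by simp at h; omega
      by_cases hc : c = ' '
      · subst hc
        have hpre : ([' '].isPrefixOf (' ' :: t)) = true := by simp [List.isPrefixOf]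
        rw [PySem.Chars.count.go, hpre]
        simp [ih t (acc + 1) ht, List.count_cons]
        omega
      · have hpre : ([' '].isPrefixOf (c :: t)) = false := by
          simp [List.isPrefixOf]; exact fun hh => absurd hh.symm hc
        rw [PySem.Chars.count.go, hpre]
        simp [ih t acc ht, List.count_cons, hc]

theorem pvCount_single (s : List Char) : PySem.Chars.count s [' '] = s.count ' ' := by
  have h := pvCountGo_single s.length s 0 le_rfl
  simp [PySem.Chars.count, List.isEmpty]
  omega

-- splitOn by a single space: joined back with spaces it is the original string,
-- and every piece is space-free
theorem pvSplitGo_spec (fuel : Nat) : ∀ (l cur : List Char) (acc : List (List Char)),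
    l.length < fuel → (∀ c ∈ cur, c ≠ ' ') →
    ∃ out, PySem.Chars.splitOn.go [' '] fuel l cur acc = acc.reverse ++ out ∧
      out ≠ [] ∧
      PySem.Chars.join [' '] out = cur.reverse ++ l ∧
      ∀ w ∈ out, ∀ c ∈ w, c ≠ ' ' := by
  induction fuel with
  | zero => intro l cur acc h; omega
  | succ n ih =>
    intro l cur acc h hcur
    cases l with
    | nil =>
      refine ⟨[cur.reverse], by simp [PySem.Chars.splitOn.go], by simp, ?_, ?_⟩
      · simp [PySem.Chars.join_singleton]
      · intro w hw c hc
        simp at hw; subst hw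
        exact hcur c (List.mem_reverse.mp hc)
    | cons c t =>
      by_cases hc : c = ' '
      · subst hc
        have hpre : ([' '].isPrefixOf (' ' :: t)) = true := by simp [List.isPrefixOf]
        have hstep : PySem.Chars.splitOn.go [' '] (n+1) (' ' :: t) cur acc
            = PySem.Chars.splitOn.go [' '] n t [] (cur.reverse :: acc) := by
          rw [PySem.Chars.splitOn.go, hpre]
          simp
        obtain ⟨out, h1, hne, h2, h3⟩ := ih t [] (cur.reverse :: acc)
          (by simp at h ⊢; omega) (by simp)
        refine ⟨cur.reverse :: out, ?_, by simp, ?_, ?_⟩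
        · rw [hstep, h1]; simp
        · cases out with
          | nil => exact absurd rfl hne
          | cons q qs =>
            rw [PySem.Chars.join_cons_cons]
            rw [h2]
            simp
        · intro w hw
          rcases List.mem_cons.mp hw with hw | hw
          · subst hw; intro ch hch; exact hcur ch (List.mem_reverse.mp hch)
          · exact h3 w hw
      · have hpre : ([' '].isPrefixOf (c :: t)) = false := by
          simp [List.isPrefixOf]; exact fun hh => absurd hh.symm hc
        have hstep : PySem.Chars.splitOn.go [' '] (n+1) (c :: t) cur acc
            = PySem.Chars.splitOn.go [' '] n t (c :: cur) acc := by
          rw [PySem.Chars.splitOn.go, hpre]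
          simp
        obtain ⟨out, h1, hne, h2, h3⟩ := ih t (c :: cur) acc
          (by simp at h ⊢; omega)
          (by intro x hx
              rcases List.mem_cons.mp hx with hx | hx
              · subst hx; exact hc
              · exact hcur x hx)
        refine ⟨out, by rw [hstep, h1], hne, ?_, h3⟩
        rw [h2]; simp

theorem pvSplit_spec (f : List Char) :
    PySem.Chars.join [' '] (PySem.Chars.splitOn f [' ']) = f ∧
    ∀ w ∈ PySem.Chars.splitOn f [' '], ∀ c ∈ w, c ≠ ' ' := by
  obtain ⟨out, h1, _, h2, h3⟩ := pvSplitGo_spec (f.length + 1) f [] [] (by omega) (by simp)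
  unfold PySem.Chars.splitOn
  rw [h1]
  simp at h2 ⊢
  exact ⟨h2, h3⟩

-- character-level lcp
def pvLcp : List Char → List Char → Nat
  | a :: as, b :: bs => if b == a then pvLcp as bs + 1 else 0
  | _, _ => 0

theorem pvScan_eq : ∀ (l : Nat) (a b : List Char), pvScan l a b = min l (pvLcp a b) := by
  intro l
  induction l with
  | zero => intro a b; simp [pvScan]
  | succ n ih =>
    intro a b
    cases a with
    | nil => simp [pvScan, pvLcp]
    | cons x xs =>
      cases b with
      | nil => simp [pvScan, pvLcp]
      | cons y ys =>
        simp only [pvScan, pvLcp]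
        by_cases h : y = x
        · simp [h, ih, Nat.succ_min_succ]
        · simp [h]

theorem pvPrefix_iff_le_lcp : ∀ (q f p : List Char), q <+: f → (q <+: p ↔ q.length ≤ pvLcp f p) := by
  intro q
  induction q with
  | nil => intro f p _; simp
  | cons c q' ih =>
    intro f p hqf
    cases f with
    | nil => exact absurd (List.eq_nil_of_prefix_nil hqf) (by simp)
    | cons d f' =>
      obtain ⟨hcd, hq'f'⟩ := List.cons_prefix_cons.mp hqf
      subst hcd
      cases p with
      | nil =>
        constructor
        · intro hpp; exact absurd (List.eq_nil_of_prefix_nil hpp) (by simp)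
        · intro hpp; simp [pvLcp] at hpp
      | cons e p' =>
        simp only [pvLcp, List.cons_prefix_cons, List.length_cons]
        by_cases he : e = c
        · subst he
          simp [ih f' p' hq'f']
        · constructor
          · rintro ⟨hcc, -⟩; exact absurd hcc.symm he
          · intro hh; simp [he] at hh

theorem pvFoldl_char (f : List Char) : ∀ (posts : List String) (a m : Nat),
    m ≤ posts.foldl (fun l p => pvScan l f p.toList) a ↔ m ≤ a ∧ ∀ p ∈ posts, m ≤ pvLcp f p.toList := by
  intro posts
  induction posts with
  | nil => intro a m; simp
  | cons p ps ih =>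
    intro a m
    rw [List.foldl_cons, ih, pvScan_eq]
    simp only [le_min_iff, List.mem_cons]
    constructor
    · rintro ⟨⟨h1, h2⟩, h3⟩
      exact ⟨h1, fun x hx => hx.elim (fun e => by rw [e]; exact h2) (h3 x)⟩
    · rintro ⟨h1, h2⟩
      exact ⟨⟨h1, h2 p (Or.inl rfl)⟩, fun x hx => h2 x (Or.inr hx)⟩

theorem pvAllStart_iff (posts : List (List Char)) (q : List Char) :
    pvAllStart posts q = true ↔ ∀ p ∈ posts, q <+: p := by
  induction posts with
  | nil => simp [pvAllStart]
  | cons p ps ih =>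
    cases hs : PySem.Chars.startswith p q with
    | false =>
      have hnp : ¬ q <+: p := fun hq => by
        have hh := (PySem.Chars.startswith_iff p q).mpr hq
        rw [hs] at hh
        exact nomatch hh
      constructor
      · intro hb
        simp [pvAllStart, hs] at hb
      · intro hall
        exact absurd (hall p (by simp)) hnp
    | true =>
      have hp : q <+: p := (PySem.Chars.startswith_iff p q).mp hs
      constructor
      · intro hb x hx
        rcases List.mem_cons.mp hx with hx | hx
        · rw [hx]; exact hp
        · have hb' : pvAllStart ps q = true := by simpa [pvAllStart, hs] using hb
          exact ih.mp hb' x hx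
      · intro hall
        have hb' : pvAllStart ps q = true :=
          ih.mpr (fun x hx => hall x (List.mem_cons_of_mem _ hx))
        simpa [pvAllStart, hs] using hb'

theorem pvCount_take_free (w : List Char) (t : Nat) (h : ∀ c ∈ w, c ≠ ' ') :
    (w.take t).count ' ' = 0 := by
  rw [List.count_eq_zero]
  intro hmem
  exact h ' ' (List.mem_of_mem_take hmem) rfl

-- 'all posts start with q' (q a prefix of the first post) is exactly 'q fits in the common lcp'
theorem pvKey (post_list : List String) (first : String) (rest : List String)
    (hpl : post_list = first :: rest) (q : List Char) (hq : q <+: first.toList) :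
    pvAllStart (post_list.map String.toList) q = true
      ↔ q.length ≤ post_list.foldl (fun l p => pvScan l first.toList p.toList) first.toList.length := by
  rw [pvAllStart_iff, pvFoldl_char]
  constructor
  · intro hall
    refine ⟨hq.length_le, ?_⟩
    intro p hp
    rw [← pvPrefix_iff_le_lcp q first.toList p.toList hq]
    exact hall p.toList (List.mem_map_of_mem hp)
  · rintro ⟨h1, h2⟩ p hp
    obtain ⟨s, hs, rfl⟩ := List.mem_map.mp hp
    rw [pvPrefix_iff_le_lcp q first.toList s.toList hq]
    exact h2 s hs

-- the check 'first ++ " "' always fails (first itself is in the list)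
theorem pvFail (post_list : List String) (first : String) (rest : List String)
    (hpl : post_list = first :: rest) :
    pvAllStart (post_list.map String.toList) (first.toList ++ [' ']) = false := by
  cases hb : pvAllStart (post_list.map String.toList) (first.toList ++ [' ']) with
  | false => rfl
  | true =>
    exfalso
    have hmem : first.toList ∈ post_list.map String.toList := by rw [hpl]; simp
    have hpref := (pvAllStart_iff _ _).mp hb first.toList hmem
    have hlen := hpref.length_le
    simp at hlen

-- a nonempty join extended by one more word
theorem pvJoin_snoc : ∀ (x : List (List Char)) (a w' : List Char),
    PySem.Chars.join [' '] ((a :: x) ++ [w']) = PySem.Chars.join [' '] (a :: x) ++ ' ' :: w' := by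
  intro x
  induction x with
  | nil =>
    intro a w'
    rw [List.cons_append, List.nil_append, PySem.Chars.join_cons_cons, PySem.Chars.join_singleton,
      PySem.Chars.join_singleton]
    simp
  | cons b x' ih =>
    intro a w'
    rw [List.cons_append, List.cons_append, PySem.Chars.join_cons_cons, ← List.cons_append,
      ih b w', PySem.Chars.join_cons_cons]
    simp

-- unfolding equation of A's loop
theorem pvGoA_cons (posts : List (List Char)) (w : List Char) (ws confirmed : List (List Char)) :
    pvGoA posts (w :: ws) confirmed
      = if pvAllStart posts (PySem.Chars.join [' '] (confirmed ++ [w]) ++ [' ']) = false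
        then (confirmed.length : Int)
        else pvGoA posts ws (confirmed ++ [w]) := rfl

-- main invariant of A's outer loop: from a state where the confirmed prefix 'pre' fits in the
-- common prefix, the loop computes |confirmed| + (spaces of the common prefix not yet passed)
theorem pvMain (post_list : List String) (first : String) (rest : List String)
    (hpl : post_list = first :: rest) :
    ∀ (ws cs : List (List Char)) (pre : List Char),
    (∀ w', PySem.Chars.join [' '] (cs ++ [w']) = pre ++ w') →
    pre.length ≤ post_list.foldl (fun l p => pvScan l first.toList p.toList) first.toList.length →
    (ws ≠ [] → first.toList = pre ++ PySem.Chars.join [' '] ws) →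
    (∀ u ∈ ws, ∀ c ∈ u, c ≠ ' ') →
    pvGoA (post_list.map String.toList) ws cs
      = (cs.length : Int) +
        ((((PySem.Chars.join [' '] ws).take
            ((post_list.foldl (fun l p => pvScan l first.toList p.toList) first.toList.length) - pre.length)).count ' ' : Nat) : Int) := by
  intro ws
  induction ws with
  | nil =>
    intro cs pre _ _ _ _
    simp [pvGoA, PySem.Chars.join_nil]
  | cons w ws' ih =>
    intro cs pre hjoin hlen hf hws
    have hnp : PySem.Chars.join [' '] (cs ++ [w]) ++ [' '] = pre ++ (w ++ [' ']) := by
      rw [hjoin w]; simp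
    have hfc : first.toList = pre ++ PySem.Chars.join [' '] (w :: ws') := hf (by simp)
    have hwfree : ∀ c ∈ w, c ≠ ' ' := hws w (by simp)
    cases ws' with
    | nil =>
      have hfc' : first.toList = pre ++ w := by
        rw [hfc, PySem.Chars.join_singleton]
      have hnp' : PySem.Chars.join [' '] (cs ++ [w]) ++ [' '] = first.toList ++ [' '] := by
        rw [hnp, hfc']; simp
      have hfail := pvFail post_list first rest hpl
      rw [← hnp'] at hfail
      rw [pvGoA_cons, hfail, if_pos rfl]
      rw [PySem.Chars.join_singleton, pvCount_take_free w _ hwfree]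
      simp
    | cons q ws'' =>
      have hjc : PySem.Chars.join [' '] (w :: q :: ws'')
          = (w ++ [' ']) ++ PySem.Chars.join [' '] (q :: ws'') := by
        rw [PySem.Chars.join_cons_cons, List.append_assoc]
      have hfc2 : first.toList = (pre ++ (w ++ [' '])) ++ PySem.Chars.join [' '] (q :: ws'') := by
        rw [hfc, hjc]; simp
      have hnp_pre : (pre ++ (w ++ [' '])) <+: first.toList := ⟨_, hfc2.symm⟩
      have hkey := pvKey post_list first rest hpl (pre ++ (w ++ [' '])) hnp_pre
      by_cases hle : (pre ++ (w ++ [' '])).length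
          ≤ post_list.foldl (fun l p => pvScan l first.toList p.toList) first.toList.length
      · have htrue := hkey.mpr hle
        have hcond : pvAllStart (post_list.map String.toList)
            (PySem.Chars.join [' '] (cs ++ [w]) ++ [' ']) = true := by
          rw [hnp]; exact htrue
        rw [pvGoA_cons, hcond, if_neg (by simp)]
        have hih := ih (cs ++ [w]) (pre ++ (w ++ [' ']))
          (by
            intro w'
            cases cs with
            | nil =>
              rw [List.nil_append, List.cons_append, List.nil_append, PySem.Chars.join_cons_cons,
                PySem.Chars.join_singleton]
              have hpre0 : pre = [] := by
                have hthis := hjoin w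
                rw [List.nil_append, PySem.Chars.join_singleton] at hthis
                have hl := congrArg List.length hthis
                simp only [List.length_append] at hl
                have : pre.length = 0 := by omega
                exact List.eq_nil_of_length_eq_zero this
              rw [hpre0]; simp
            | cons c0 cs' =>
              rw [List.cons_append, pvJoin_snoc, ← List.cons_append, hjoin w]
              simp)
          hle
          (fun _ => hfc2)
          (fun u hu => hws u (List.mem_cons_of_mem _ hu))
        rw [hih]
        -- split the take across 'w ++ [' ']'
        rw [hjc]
        have hle' : pre.length + (w.length + 1)
            ≤ post_list.foldl (fun l p => pvScan l first.toList p.toList) first.toList.length := by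
          simp only [List.length_append, List.length_cons, List.length_nil] at hle
          omega
        rw [List.take_append, List.count_append]
        have h1 : (w ++ [' ']).take
            ((post_list.foldl (fun l p => pvScan l first.toList p.toList) first.toList.length) - pre.length)
            = w ++ [' '] := by
          apply List.take_of_length_le
          simp only [List.length_append, List.length_cons, List.length_nil]
          omega
        have h2 : (post_list.foldl (fun l p => pvScan l first.toList p.toList) first.toList.length)
              - pre.length - (w ++ [' ']).length
            = (post_list.foldl (fun l p => pvScan l first.toList p.toList) first.toList.length)
              - (pre ++ (w ++ [' '])).length := by
          simp only [List.length_append, List.length_cons, List.length_nil]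
          omega
        have hcw : (w ++ [' ']).count ' ' = 1 := by
          rw [List.count_append]
          have hw0 : w.count ' ' = 0 := by
            rw [List.count_eq_zero]; intro hm; exact hwfree ' ' hm rfl
          simp [hw0]
        rw [h1, h2, hcw]
        simp only [List.length_append, List.length_cons, List.length_nil]
        push_cast
        ring
      · have hfalse : pvAllStart (post_list.map String.toList) (pre ++ (w ++ [' '])) = false := by
          cases hb : pvAllStart (post_list.map String.toList) (pre ++ (w ++ [' '])) with
          | false => rfl
          | true => exact absurd (hkey.mp hb) hle
        rw [← hnp] at hfalse
        rw [pvGoA_cons, hfalse, if_pos rfl]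
        have htle : (post_list.foldl (fun l p => pvScan l first.toList p.toList) first.toList.length) - pre.length
            ≤ w.length := by
          simp only [List.length_append, List.length_cons, List.length_nil, not_le] at hle
          omega
        rw [hjc, List.append_assoc, List.take_append_of_le_length htle,
          pvCount_take_free w _ hwfree]
        simp

-- ===== VERDICT (by name: the statement is the Claim_ definition above) =====
theorem compute_common_prefix_count_spec : Claim_equal_compute_common_prefix_count := by
  intro post_list _ hpre
  unfold Spec_compute_common_prefix_count
  cases post_list with
  | nil => exact absurd rfl hpre
  | cons first rest =>
    obtain ⟨hjoinw, hfree⟩ := pvSplit_spec first.toList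
    have hmain := pvMain (first :: rest) first rest rfl
      (PySem.Chars.splitOn first.toList [' ']) [] []
      (fun w' => by rw [List.nil_append, PySem.Chars.join_singleton]; simp)
      (by simp)
      (fun _ => by rw [hjoinw]; simp)
      hfree
    unfold compute_common_prefix_count compute_common_prefix_count_alt
    simp only []
    rw [hmain, hjoinw, pvCount_single]
    simp
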